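-- pv_equiv track=rewrite | github.com/andretorresb/Ajuste_estoque_Django | estoque/firebird_ops.py | _try_segment_mapping
-- ===== SOURCE A (Python) =====
-- import itertools
--
-- def _try_segment_mapping(stored: str, plain: str):
--     stored = '' if stored is None else str(stored)
--     plain = '' if plain is None else str(plain)
--     L = len(stored)
--     N = len(plain)
--     if N == 0 or L == 0 or N > L:
--         return None
--     if L == N:
--         mapping = {}
--         rev = {}
--         ok = True
--         for ch, seg in zip(plain, stored):
--             if ch in mapping and mapping[ch] != seg:
--                 ok = False; break
--             if seg in rev and rev[seg] != ch:
--                 ok = False; break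
--             mapping[ch] = seg; rev[seg] = ch
--         return mapping if ok else None
--
--     for cuts in itertools.combinations(range(1, L), N-1):
--         parts = []
--         last = 0
--         for c in cuts:
--             parts.append(stored[last:c])
--             last = c
--         parts.append(stored[last:])
--         mapping = {}
--         rev = {}
--         ok = True
--         for ch, seg in zip(plain, parts):
--             if ch in mapping and mapping[ch] != seg:
--                 ok = False; break
--             if seg in rev and rev[seg] != ch:
--                 ok = False; break
--             mapping[ch] = seg
--             rev[seg] = ch
--         if ok:
--             return mapping
--     return None
-- ===== SOURCE B (Python) =====
-- def _try_segment_mapping(stored: str, plain: str):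
--     stored = '' if stored is None else str(stored)
--     plain = '' if plain is None else str(plain)
--     L = len(stored)
--     N = len(plain)
--     if N == 0 or L == 0 or N > L:
--         return None
--
--     mapping = {}
--     rev = {}
--
--     def dfs(i, k):
--         # consume chars whose segment is already fixed (no branching, no frame)
--         while True:
--             ch = plain[k]
--             seg = mapping.get(ch)
--             if seg is None:
--                 break
--             if k == N - 1:
--                 return dict(mapping) if stored[i:] == seg else None
--             j = i + len(seg)
--             if j > L - (N - 1 - k) or stored[i:j] != seg:
--                 return None
--             i, k = j, k + 1
--         # ch is new: pick its segment, shortest first, leaving room for the rest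
--         if k == N - 1:
--             seg = stored[i:]
--             if seg in rev:
--                 return None
--             mapping[ch] = seg
--             rev[seg] = ch
--             res = dict(mapping)
--             del mapping[ch]
--             del rev[seg]
--             return res
--         for j in range(i + 1, L - (N - 1 - k) + 1):
--             seg = stored[i:j]
--             if seg in rev:
--                 continue
--             mapping[ch] = seg
--             rev[seg] = ch
--             res = dfs(j, k + 1)
--             if res is not None:
--                 return res
--             del mapping[ch]
--             del rev[seg]
--         return None
--
--     return dfs(0, 0)
-- ===== Notes on version B (the rewrite author's own statement) =====
-- stated objective: alternative
-- what changed: A materialises every C(L-1,N-1) cut combination and re-checks each candidate partition from scratch; B does a depth-first backtracking search that fixes the segment of an already-mapped character outright and branches only on new characters, abandoning a whole family of cut combinations as soon as a prefix is inconsistent or infeasible.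
import Mathlib
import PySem

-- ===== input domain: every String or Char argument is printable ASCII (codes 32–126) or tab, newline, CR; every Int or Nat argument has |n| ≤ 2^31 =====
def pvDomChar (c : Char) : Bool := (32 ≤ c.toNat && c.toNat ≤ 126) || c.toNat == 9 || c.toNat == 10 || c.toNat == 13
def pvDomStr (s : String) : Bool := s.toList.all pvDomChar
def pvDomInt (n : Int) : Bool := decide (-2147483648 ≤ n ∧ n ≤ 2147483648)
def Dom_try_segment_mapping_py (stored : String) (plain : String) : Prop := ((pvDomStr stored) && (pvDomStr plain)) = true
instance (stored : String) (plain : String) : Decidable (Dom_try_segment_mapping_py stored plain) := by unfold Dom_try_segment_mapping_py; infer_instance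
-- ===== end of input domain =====

-- B replaces A's enumeration of all C(L-1,N-1) cut combinations by a depth-first
-- backtracking search that extends the char→segment mapping one segment at a time
-- and prunes inconsistent prefixes (objective: alternative).

-- ===== PORT A =====
-- 'ch in d and d[ch] != seg' (shared by both Pythons verbatim)
def pvConflict (d : PySem.Dict String String) (k v : String) : Bool :=
  d.contains k && d.getD k "" != v

-- itertools.combinations(l, k) in its lexicographic emission order
def combosA : List Int → Nat → List (List Int)
  | _, 0 => [[]]
  | [], _ + 1 => []
  | x :: xs, k + 1 => (combosA xs k).map (fun t => x :: t) ++ combosA xs (k + 1)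

-- A's 'for ch, seg in zip(...)' consistency loop (ok/break), returning mapping if ok
def checkA (pairs : List (String × String)) (mapping rev : PySem.Dict String String) :
    Option (PySem.Dict String String) :=
  match pairs with
  | [] => some mapping
  | (ch, seg) :: rest =>
    if pvConflict mapping ch seg then none
    else if pvConflict rev seg ch then none
    else checkA rest (mapping.insert ch seg) (rev.insert seg ch)

-- A's parts-building loop: parts.append(stored[last:c]); last = c; then stored[last:]
def buildPartsA (stored : String) (cuts : List Int) : List String :=
  let st := cuts.foldl
    (fun (acc : List String × Int) c =>
      (acc.1 ++ [PySem.Str.slice stored (some acc.2) (some c)], c)) ([], 0)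
  st.1 ++ [PySem.Str.slice stored (some st.2) none]

-- A's outer 'for cuts in itertools.combinations(...)' with early return
def searchA (stored : String) (P : List String) : List (List Int) → Option (PySem.Dict String String)
  | [] => none
  | cuts :: rest =>
    match checkA (List.zip P (buildPartsA stored cuts)) PySem.Dict.empty PySem.Dict.empty with
    | some m => some m
    | none => searchA stored P rest

def try_segment_mapping_py (stored : String) (plain : String) : Option (List (String × String)) :=
  if PySem.Str.len plain = 0 ∨ PySem.Str.len stored = 0 ∨
      PySem.Str.len plain > PySem.Str.len stored then none
  else if PySem.Str.len stored = PySem.Str.len plain then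
    (checkA (List.zip (plain.toList.map Char.toString) (stored.toList.map Char.toString))
        PySem.Dict.empty PySem.Dict.empty).map PySem.Dict.items
  else
    (searchA stored (plain.toList.map Char.toString)
        (combosA (PySem.List.pyRange 1 (PySem.Str.len stored) 1)
          (PySem.Str.len plain - 1).toNat)).map PySem.Dict.items

-- ===== PORT B =====
-- B's dfs(i, k): remaining plain chars are passed as a list; mapping m / reverse r;
-- a char already in m forces its segment (python's inner while), a new char branches
def dfsB2 (stored : String) (L : Int) :
    List String → Int → PySem.Dict String String → PySem.Dict String String →
    Option (PySem.Dict String String)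
  | [], _, _, _ => none
  | [ch], i, m, r =>
    match m.get? ch with
    | some seg => if PySem.Str.slice stored (some i) none == seg then some m else none
    | none =>
      let seg := PySem.Str.slice stored (some i) none
      if r.contains seg then none else some (m.insert ch seg)
  | ch :: ch2 :: cs, i, m, r =>
    match m.get? ch with
    | some seg =>
      let j := i + PySem.Str.len seg
      if j > L - ((cs.length : Int) + 1) ∨ PySem.Str.slice stored (some i) (some j) ≠ seg then
        none
      else dfsB2 stored L (ch2 :: cs) j m r
    | none =>
      -- range(i + 1, L - (N - 1 - k) + 1): the N - 1 - k remaining chars are ch2 :: cs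
      (PySem.List.pyRange (i + 1) (L - ((cs.length : Int) + 1) + 1) 1).findSome? (fun j =>
        let seg := PySem.Str.slice stored (some i) (some j)
        if r.contains seg then none
        else dfsB2 stored L (ch2 :: cs) j (m.insert ch seg) (r.insert seg ch))

def try_segment_mapping_py_alt (stored : String) (plain : String) : Option (List (String × String)) :=
  if PySem.Str.len plain = 0 ∨ PySem.Str.len stored = 0 ∨
      PySem.Str.len plain > PySem.Str.len stored then none
  else
    (dfsB2 stored (PySem.Str.len stored) (plain.toList.map Char.toString) 0
      PySem.Dict.empty PySem.Dict.empty).map PySem.Dict.items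

-- ===== PRECONDITION & SPEC =====
def Spec_try_segment_mapping_py (stored : String) (plain : String) (out : Option (List (String × String))) : Prop := out = try_segment_mapping_py_alt stored plain
instance (stored : String) (plain : String) (out : Option (List (String × String))) : Decidable (Spec_try_segment_mapping_py stored plain out) := by unfold Spec_try_segment_mapping_py; infer_instance

-- ===== CLAIM (what is proved, stated in full; the proofs are below) =====
def Claim_equal_try_segment_mapping_py : Prop := ∀ (stored : String) (plain : String), Dom_try_segment_mapping_py stored plain → Spec_try_segment_mapping_py stored plain (try_segment_mapping_py stored plain)

-- ===== LEMMAS AND PROOFS =====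

-- reference search: one branch per candidate cut, checking conflicts pair by pair
def stepB (m r : PySem.Dict String String) (ch seg : String) :
    Option (PySem.Dict String String × PySem.Dict String String) :=
  if pvConflict m ch seg then none
  else if pvConflict r seg ch then none
  else some (m.insert ch seg, r.insert seg ch)

def dfsB (stored : String) (L : Int) :
    List String → Int → PySem.Dict String String → PySem.Dict String String →
    Option (PySem.Dict String String)
  | [], _, _, _ => none
  | [ch], i, m, r => (stepB m r ch (PySem.Str.slice stored (some i) none)).map (·.1)
  | ch :: ch2 :: cs, i, m, r =>
    -- range(i + 1, L - (N - 1 - k) + 1): the N - 1 - k remaining chars are ch2 :: cs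
    (PySem.List.pyRange (i + 1) (L - ((cs.length : Int) + 1) + 1) 1).findSome? (fun cut =>
      match stepB m r ch (PySem.Str.slice stored (some i) (some cut)) with
      | none => none
      | some st => dfsB stored L (ch2 :: cs) cut st.1 st.2)


-- m and r are mutually inverse, have unique keys, and store nonempty segments
def InvMR (m r : PySem.Dict String String) : Prop :=
  m.keys.Nodup ∧ r.keys.Nodup ∧
  (∀ k v, m.get? k = some v → r.get? v = some k) ∧
  (∀ v k, r.get? v = some k → m.get? k = some v) ∧
  (∀ k v, m.get? k = some v → v.toList ≠ [])


-- the segments cut out of stored at positions i, cuts…, end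
def partsFrom (stored : String) (i : Int) : List Int → List String
  | [] => [PySem.Str.slice stored (some i) none]
  | c :: cuts => PySem.Str.slice stored (some i) (some c) :: partsFrom stored c cuts

-- running the consistency check along chars cs and the segments cut at i, cuts…, end
def checkSeq (stored : String) (m r : PySem.Dict String String) (i : Int) :
    List String → List Int → Option (PySem.Dict String String)
  | [ch], [] => (stepB m r ch (PySem.Str.slice stored (some i) none)).map (·.1)
  | ch :: cs, c :: cuts =>
    match stepB m r ch (PySem.Str.slice stored (some i) (some c)) with
    | none => none
    | some st => checkSeq stored st.1 st.2 c cs cuts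
  | _, _ => none

theorem buildPartsA_foldl (stored : String) (cuts : List Int) :
    ∀ (acc : List String) (i : Int),
      (let st := cuts.foldl
        (fun (acc : List String × Int) c =>
          (acc.1 ++ [PySem.Str.slice stored (some acc.2) (some c)], c)) (acc, i)
       st.1 ++ [PySem.Str.slice stored (some st.2) none]) = acc ++ partsFrom stored i cuts := by
  induction cuts with
  | nil => intro acc i; simp [partsFrom]
  | cons c cuts ih =>
    intro acc i
    simpa [partsFrom, List.foldl_cons] using ih (acc ++ [PySem.Str.slice stored (some i) (some c)]) c

theorem buildPartsA_eq (stored : String) (cuts : List Int) :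
    buildPartsA stored cuts = partsFrom stored 0 cuts := by
  simpa [buildPartsA] using buildPartsA_foldl stored cuts [] 0

theorem checkA_eq_checkSeq (stored : String) (cuts : List Int) (cs : List String)
    (m r : PySem.Dict String String) (i : Int) (h : cs.length = cuts.length + 1) :
    checkA (List.zip cs (partsFrom stored i cuts)) m r = checkSeq stored m r i cs cuts := by
  induction cuts generalizing cs m r i with
  | nil =>
    match cs, h with
    | [ch], _ =>
      simp only [partsFrom, List.zip, checkSeq, stepB]
      split_ifs with h1 h2 <;> simp_all [checkA]
  | cons c cuts ih =>
    match cs, h with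
    | ch :: cs, h =>
      have hcs : cs.length = cuts.length + 1 := by simpa using h
      simp only [partsFrom, List.zip, checkSeq, stepB]
      split_ifs with h1 h2 <;> simp_all [checkA, List.zip]

theorem length_combosA (l : List Int) (k : Nat) (cuts : List Int) (h : cuts ∈ combosA l k) :
    cuts.length = k := by
  induction l generalizing k cuts with
  | nil =>
    cases k with
    | zero => simp [combosA] at h; simp [h]
    | succ k => simp [combosA] at h
  | cons x xs ih =>
    cases k with
    | zero => simp [combosA] at h; simp [h]
    | succ k =>
      simp only [combosA, List.mem_append, List.mem_map] at h
      rcases h with ⟨t, ht, rfl⟩ | h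
      · simp [ih k t ht]
      · exact ih (k + 1) cuts h

theorem combosA_nil_of_lt (l : List Int) (k : Nat) (h : l.length < k) : combosA l k = [] := by
  induction l generalizing k with
  | nil =>
    cases k with
    | zero => omega
    | succ k => simp [combosA]
  | cons x xs ih =>
    cases k with
    | zero => simp at h
    | succ k =>
      simp only [combosA]
      rw [ih k (by simpa using h), ih (k + 1) (by simp at h ⊢; omega)]
      simp

theorem combosA_all (l : List Int) : combosA l l.length = [l] := by
  induction l with
  | nil => simp [combosA]
  | cons x xs ih =>
    simp only [List.length_cons, combosA, ih]
    rw [combosA_nil_of_lt xs (xs.length + 1) (by omega)]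
    simp

theorem combosA_range (b : Int) (k : Nat) (a : Int) :
    combosA (PySem.List.pyRange a b 1) (k + 1) =
      (PySem.List.pyRange a b 1).flatMap
        (fun c => (combosA (PySem.List.pyRange (c + 1) b 1) k).map (fun t => c :: t)) := by
  by_cases hab : b ≤ a
  · rw [PySem.List.pyRange_one_eq_nil hab]; simp [combosA]
  · replace hab := lt_of_not_ge hab
    have hfuel : (b - a).toNat = (b - (a + 1)).toNat + 1 := by omega
    rw [PySem.List.pyRange_one_cons hab]
    simp only [combosA, List.flatMap_cons]
    rw [combosA_range b k (a + 1)]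
termination_by (b - a).toNat
decreasing_by omega

theorem findSome?_flatMap {α β γ : Type} (l : List α) (g : α → List β) (f : β → Option γ) :
    (l.flatMap g).findSome? f = l.findSome? (fun x => (g x).findSome? f) := by
  induction l with
  | nil => simp
  | cons x l ih =>
    simp only [List.flatMap_cons, List.findSome?_append, List.findSome?_cons, ih]
    cases hx : (g x).findSome? f <;> simp [Option.or]

theorem findSome?_congr {α γ : Type} (l : List α) (f g : α → Option γ)
    (h : ∀ x ∈ l, f x = g x) : l.findSome? f = l.findSome? g := by
  induction l with
  | nil => simp
  | cons x l ih =>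
    simp only [List.findSome?_cons, h x (by simp)]
    cases g x <;> simp [ih (fun y hy => h y (by simp [hy]))]

theorem searchA_eq_findSome? (stored : String) (P : List String) (l : List (List Int)) :
    searchA stored P l =
      l.findSome? (fun cuts =>
        checkA (List.zip P (buildPartsA stored cuts)) PySem.Dict.empty PySem.Dict.empty) := by
  induction l with
  | nil => simp [searchA]
  | cons cuts rest ih =>
    simp only [searchA, List.findSome?_cons, ih]
    cases checkA (List.zip P (buildPartsA stored cuts)) PySem.Dict.empty PySem.Dict.empty <;> simp

-- the heart: DFS with pruning = first consistent cut combination in lexicographic order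
theorem findSome?_const_none {α γ : Type} (l : List α) :
    l.findSome? (fun _ => (none : Option γ)) = none := by
  induction l <;> simp [*]

theorem dfsB_eq (stored : String) (L : Int) (cs : List String) (i : Int)
    (m r : PySem.Dict String String) (h : cs ≠ []) :
    dfsB stored L cs i m r =
      (combosA (PySem.List.pyRange (i + 1) L 1) (cs.length - 1)).findSome?
        (fun cuts => checkSeq stored m r i cs cuts) := by
  induction cs generalizing i m r with
  | nil => exact absurd rfl h
  | cons ch cs ih =>
    cases cs with
    | nil =>
      cases hst : stepB m r ch (PySem.Str.slice stored (some i) none) <;>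
        simp [dfsB, combosA, checkSeq, hst]
    | cons ch2 cs' =>
      have hk : (ch :: ch2 :: cs').length - 1 = ((ch2 :: cs').length - 1) + 1 := by simp
      rw [hk, combosA_range, findSome?_flatMap]
      simp only [dfsB]
      rw [show L - ((cs'.length : Int) + 1) + 1 = L - (cs'.length : Int) from by ring]
      have hdead : ∀ c : Int, L - (cs'.length : Int) ≤ c → c < L →
          ((combosA (PySem.List.pyRange (c + 1) L 1) ((ch2 :: cs').length - 1)).findSome?
            ((fun cuts => checkSeq stored m r i (ch :: ch2 :: cs') cuts) ∘ (fun t => c :: t)) : Option (PySem.Dict String String)) = none := by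
        intro c hc hcL
        rw [combosA_nil_of_lt _ _ (by
          rw [PySem.List.length_pyRange_one]; simp only [List.length_cons]; omega)]
        rfl
      have hbody : ∀ c : Int, i + 1 ≤ c → c < L - (cs'.length : Int) ∨ c < L →
          ((combosA (PySem.List.pyRange (c + 1) L 1) ((ch2 :: cs').length - 1)).map
            (fun t => c :: t)).findSome? (fun cuts => checkSeq stored m r i (ch :: ch2 :: cs') cuts) =
          (match stepB m r ch (PySem.Str.slice stored (some i) (some c)) with
            | none => none
            | some st => dfsB stored L (ch2 :: cs') c st.1 st.2) := by
        intro c _ _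
        rw [List.findSome?_map]
        cases hst : stepB m r ch (PySem.Str.slice stored (some i) (some c)) with
        | none =>
          simp only [Function.comp_def, checkSeq, hst]
          exact findSome?_const_none _
        | some st =>
          simp only [Function.comp_def, checkSeq, hst]
          exact (ih c st.1 st.2 (by simp)).symm ▸ rfl
      by_cases hM : i + 1 ≤ L - (cs'.length : Int)
      · rw [PySem.List.pyRange_one_append (i + 1) (L - (cs'.length : Int)) L hM (by omega),
          List.findSome?_append]
        rw [findSome?_congr (PySem.List.pyRange (L - (cs'.length : Int)) L 1) _
          (fun _ => none) (fun c hcmem => by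
            have hcb := (PySem.List.mem_pyRange_one.mp hcmem)
            rw [List.findSome?_map]
            exact hdead c hcb.1 hcb.2)]
        rw [findSome?_const_none, Option.or_none]
        exact (findSome?_congr _ _ _ (fun c hcmem => by
          have hcb := (PySem.List.mem_pyRange_one.mp hcmem)
          exact hbody c hcb.1 (Or.inl hcb.2))).symm
      · rw [PySem.List.pyRange_one_eq_nil (by omega), List.findSome?_nil]
        rw [findSome?_congr (PySem.List.pyRange (i + 1) L 1) _ (fun _ => none)
          (fun c hcmem => by
            have hcb := (PySem.List.mem_pyRange_one.mp hcmem)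
            rw [List.findSome?_map]
            exact hdead c (by omega) hcb.2)]
        exact (findSome?_const_none _).symm

theorem invMR_empty : InvMR PySem.Dict.empty PySem.Dict.empty := by
  refine ⟨PySem.Dict.nodup_keys_empty, PySem.Dict.nodup_keys_empty, ?_, ?_, ?_⟩ <;>
    intro k v h <;> rw [PySem.Dict.get?_empty] at h <;> cases h

theorem dict_insert_same (d : PySem.Dict String String) (k : String) (v : String)
    (h : d.get? k = some v) (hn : d.keys.Nodup) : d.insert k v = d := by
  apply PySem.Dict.ext
  rw [PySem.Dict.items_insert_of_contains d v
    (by rw [PySem.Dict.contains_eq_isSome_get?, h]; rfl)]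
  have : ∀ p ∈ d.items, (if (p.1 == k) = true then (k, v) else p) = p := by
    intro p hp
    by_cases hk : p.1 = k
    · have hpm : (k, p.2) ∈ d.items := by rw [← hk]; exact hp
      have := PySem.Dict.get?_of_mem_items d hpm hn
      rw [h] at this
      simp only [hk, beq_self_eq_true, if_true]
      cases p; simp at hk ⊢; simp_all
    · simp [hk]
  rw [List.map_congr_left this]
  exact List.map_id _

theorem invMR_insert_new (m r : PySem.Dict String String) (ch seg : String)
    (hI : InvMR m r) (hm : m.get? ch = none) (hr : r.get? seg = none)
    (hne : seg.toList ≠ []) : InvMR (m.insert ch seg) (r.insert seg ch) := by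
  obtain ⟨hn1, hn2, hf, hb, hv⟩ := hI
  refine ⟨PySem.Dict.nodup_keys_insert _ _ _ hn1, PySem.Dict.nodup_keys_insert _ _ _ hn2,
    ?_, ?_, ?_⟩
  · intro k v h
    rw [PySem.Dict.get?_insert] at h ⊢
    by_cases hk : k = ch
    · subst hk
      rw [if_pos rfl] at h
      cases h
      rw [if_pos rfl]
    · rw [if_neg hk] at h
      have hv' : v ≠ seg := by
        intro he; rw [he] at h; rw [hf k seg h] at hr; cases hr
      rw [if_neg hv']
      exact hf k v h
  · intro v k h
    rw [PySem.Dict.get?_insert] at h ⊢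
    by_cases hk : v = seg
    · subst hk
      rw [if_pos rfl] at h
      cases h
      rw [if_pos rfl]
    · rw [if_neg hk] at h
      have hk' : k ≠ ch := by
        intro he; rw [he] at h; rw [hb v ch h] at hm; cases hm
      rw [if_neg hk']
      exact hb v k h
  · intro k v h
    rw [PySem.Dict.get?_insert] at h
    by_cases hk : k = ch
    · rw [if_pos hk] at h; cases h; exact hne
    · rw [if_neg hk] at h; exact hv k v h

theorem stepB_char_new (m r : PySem.Dict String String) (ch seg : String)
    (hm : m.get? ch = none) (hI : InvMR m r) :
    stepB m r ch seg =
      if r.contains seg then none else some (m.insert ch seg, r.insert seg ch) := by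
  obtain ⟨_, _, _, hb, _⟩ := hI
  have h1 : pvConflict m ch seg = false := by
    simp [pvConflict, PySem.Dict.contains_eq_isSome_get?, hm]
  cases hrg : r.get? seg with
  | none =>
    have h2 : pvConflict r seg ch = false := by
      simp [pvConflict, PySem.Dict.contains_eq_isSome_get?, hrg]
    have h3 : r.contains seg = false := by
      rw [PySem.Dict.contains_eq_isSome_get?, hrg]; rfl
    rw [stepB, h1, h2, h3]
    rfl
  | some c =>
    have hcne : c ≠ ch := by
      intro he; rw [he] at hrg; rw [hb seg ch hrg] at hm; cases hm
    have h2 : pvConflict r seg ch = true := by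
      simp [pvConflict, PySem.Dict.contains_eq_isSome_get?, hrg,
        PySem.Dict.getD_eq_get?_getD, hcne]
    have h3 : r.contains seg = true := by
      rw [PySem.Dict.contains_eq_isSome_get?, hrg]; rfl
    rw [stepB, h1, h2, h3]
    rfl

theorem stepB_char_old (m r : PySem.Dict String String) (ch seg0 seg : String)
    (hm : m.get? ch = some seg0) (hI : InvMR m r) :
    stepB m r ch seg = if seg = seg0 then some (m, r) else none := by
  obtain ⟨hn1, hn2, hf, _, _⟩ := hI
  by_cases he : seg = seg0
  · subst he
    have h1 : pvConflict m ch seg = false := by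
      simp [pvConflict, PySem.Dict.getD_eq_get?_getD, hm]
    have hrg : r.get? seg = some ch := hf ch seg hm
    have h2 : pvConflict r seg ch = false := by
      simp [pvConflict, PySem.Dict.getD_eq_get?_getD, hrg]
    rw [stepB, h1, h2, if_pos rfl]
    simp only [Bool.false_eq_true, if_false]
    rw [dict_insert_same m ch seg hm hn1, dict_insert_same r seg ch hrg hn2]
  · have h1 : pvConflict m ch seg = true := by
      simp [pvConflict, PySem.Dict.contains_eq_isSome_get?, PySem.Dict.getD_eq_get?_getD, hm]
      exact fun he' => absurd he'.symm he
    rw [stepB, h1, if_neg he]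
    rfl

theorem slice_toList_len (stored : String) (i j : Int) (h0 : 0 ≤ i) (hij : i ≤ j)
    (hj : j ≤ (stored.toList.length : Int)) :
    (PySem.Str.slice stored (some i) (some j)).toList.length = (j - i).toNat := by
  rw [PySem.Str.toList_slice, PySem.Chars.slice, PySem.List.slice_toNat _ h0 (le_trans h0 hij)]
  rw [List.length_take, List.length_drop]
  omega

theorem slice_ne_empty (stored : String) (i j : Int) (h0 : 0 ≤ i) (hij : i < j)
    (hj : j ≤ (stored.toList.length : Int)) :
    (PySem.Str.slice stored (some i) (some j)).toList ≠ [] := by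
  intro he
  have := slice_toList_len stored i j h0 (le_of_lt hij) hj
  rw [he] at this
  simp at this
  omega

-- forced-extension DFS = reference DFS, given the bijection invariant
theorem dfsB2_eq_dfsB (stored : String) (L : Int) (hL : L = (stored.toList.length : Int)) :
    ∀ (cs : List String) (i : Int) (m r : PySem.Dict String String),
      InvMR m r → 0 ≤ i → i ≤ L →
      dfsB2 stored L cs i m r = dfsB stored L cs i m r := by
  intro cs
  induction cs with
  | nil => intro i m r _ _ _; rfl
  | cons ch cs ih =>
    cases cs with
    | nil =>
      intro i m r hI h0 hiL
      cases hm : m.get? ch with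
      | some seg0 =>
        simp only [dfsB2, dfsB, hm, stepB_char_old m r ch seg0 _ hm hI]
        by_cases he : PySem.Str.slice stored (some i) none = seg0
        · rw [if_pos he, if_pos (by simp [he])]
          rfl
        · rw [if_neg he, if_neg (by simp [he])]
          rfl
      | none =>
        simp only [dfsB2, dfsB, hm, stepB_char_new m r ch _ hm hI]
        by_cases hc : r.contains (PySem.Str.slice stored (some i) none)
        · rw [if_pos hc, if_pos hc]
          rfl
        · rw [if_neg hc, if_neg hc]
          rfl
    | cons ch2 cs' =>
      intro i m r hI h0 hiL
      have hIkeep := hI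
      obtain ⟨hn1, hn2, hf, hb, hv⟩ := hI
      cases hm : m.get? ch with
      | none =>
        simp only [dfsB2, dfsB, hm]
        refine findSome?_congr _ _ _ (fun j hjmem => ?_)
        have hjb := PySem.List.mem_pyRange_one.mp hjmem
        have hjL : j ≤ L := by omega
        rw [stepB_char_new m r ch _ hm hIkeep]
        cases hc : r.contains (PySem.Str.slice stored (some i) (some j)) with
        | true => rfl
        | false =>
          simp only [Bool.false_eq_true, if_false]
          have hrg : r.get? (PySem.Str.slice stored (some i) (some j)) = none := by
            rw [PySem.Dict.contains_eq_isSome_get?] at hc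
            cases hx : r.get? (PySem.Str.slice stored (some i) (some j))
            · rfl
            · rw [hx] at hc; simp at hc
          exact ih j _ _
            (invMR_insert_new m r ch _ hIkeep hm hrg
              (slice_ne_empty stored i j h0 (by omega) (by omega)))
            (by omega) hjL
      | some seg0 =>
        have hs0ne : seg0.toList ≠ [] := hv ch seg0 hm
        have hs0len : 1 ≤ seg0.toList.length := by
          cases hx : seg0.toList with
          | nil => exact absurd hx hs0ne
          | cons a t => simp
        simp only [dfsB2, dfsB, hm, PySem.Str.len_eq]
        set j0 : Int := i + (seg0.toList.length : Int) with hj0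
        -- a candidate j matches seg0 only if j = j0
        have huniq : ∀ j : Int, i + 1 ≤ j → j ≤ L →
            PySem.Str.slice stored (some i) (some j) = seg0 → j = j0 := by
          intro j hj1 hjL hse
          have := slice_toList_len stored i j h0 (by omega) (by omega)
          rw [hse] at this
          omega
        by_cases hdead : j0 > L - ((cs'.length : Int) + 1) ∨
            PySem.Str.slice stored (some i) (some j0) ≠ seg0
        · rw [if_pos hdead]
          symm
          rw [findSome?_congr _ _ (fun _ => none) (fun j hjmem => by
            have hjb := PySem.List.mem_pyRange_one.mp hjmem
            rw [stepB_char_old m r ch seg0 _ hm hIkeep]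
            rw [if_neg (fun hse => by
              have hjeq := huniq j hjb.1 (by omega) hse
              rw [hjeq] at hse hjb
              rcases hdead with hd | hd
              · omega
              · exact hd hse)])]
          exact findSome?_const_none _
        · rw [if_neg hdead]
          rw [not_or, not_lt, not_not] at hdead
          obtain ⟨hj0b, hj0s⟩ := hdead
          have hj0ge : i + 1 ≤ j0 := by omega
          have hj0L : j0 ≤ L := by omega
          rw [PySem.List.pyRange_one_append (i + 1) j0 (L - ((cs'.length : Int) + 1) + 1)
            hj0ge (by omega), List.findSome?_append]
          have hfirst : (PySem.List.pyRange (i + 1) j0 1).findSome?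
              (fun cut => match stepB m r ch (PySem.Str.slice stored (some i) (some cut)) with
                | none => none
                | some st => dfsB stored L (ch2 :: cs') cut st.1 st.2) = none := by
            rw [findSome?_congr _ _ (fun _ => none) (fun j hjmem => by
              have hjb := PySem.List.mem_pyRange_one.mp hjmem
              rw [stepB_char_old m r ch seg0 _ hm hIkeep]
              rw [if_neg (fun hse => by have := huniq j hjb.1 (by omega) hse; omega)])]
            exact findSome?_const_none _
          rw [hfirst, Option.none_or]
          rw [PySem.List.pyRange_one_cons (by omega), List.findSome?_cons]
          have hstep : (match stepB m r ch (PySem.Str.slice stored (some i) (some j0)) with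
              | none => none
              | some st => dfsB stored L (ch2 :: cs') j0 st.1 st.2) =
              dfsB stored L (ch2 :: cs') j0 m r := by
            rw [stepB_char_old m r ch seg0 _ hm hIkeep, if_pos hj0s]
          have hrest : (PySem.List.pyRange (j0 + 1) (L - ((cs'.length : Int) + 1) + 1) 1).findSome?
              (fun cut => match stepB m r ch (PySem.Str.slice stored (some i) (some cut)) with
                | none => none
                | some st => dfsB stored L (ch2 :: cs') cut st.1 st.2) = none := by
            rw [findSome?_congr _ _ (fun _ => none) (fun j hjmem => by
              have hjb := PySem.List.mem_pyRange_one.mp hjmem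
              rw [stepB_char_old m r ch seg0 _ hm hIkeep]
              rw [if_neg (fun hse => by have := huniq j (by omega) (by omega) hse; omega)])]
            exact findSome?_const_none _
          rw [hstep, ← ih j0 m r hIkeep (by omega) hj0L, hrest]
          cases dfsB2 stored L (ch2 :: cs') j0 m r <;> rfl

theorem partsFrom_range (stored : String) (j : Nat) (h : j < stored.toList.length) :
    partsFrom stored (j : Int) (PySem.List.pyRange ((j : Int) + 1) (stored.toList.length : Int) 1) =
      (stored.toList.drop j).map Char.toString := by
  induction hn : stored.toList.length - j generalizing j with
  | zero => omega
  | succ n ih =>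
    have hdrop := List.drop_eq_getElem_cons h
    by_cases hj : j + 1 < stored.toList.length
    · rw [PySem.List.pyRange_one_cons (by exact_mod_cast hj)]
      simp only [partsFrom]
      rw [hdrop]
      have hc : ((j : Int) + 1) = ((j + 1 : Nat) : Int) := by push_cast; ring
      rw [hc]
      rw [ih (j + 1) hj (by omega)]
      simp only [List.map_cons]
      congr 1
      rw [show (Char.toString stored.toList[j]) = String.ofList [stored.toList[j]] from
        String.toByteArray_inj.mp rfl]
      simp only [PySem.Str.slice, PySem.Chars.slice]
      rw [PySem.List.slice_natCast, hdrop, show j + 1 - j = 1 from by omega]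
      rfl
    · have hje : j + 1 = stored.toList.length := by omega
      rw [PySem.List.pyRange_one_eq_nil (by omega)]
      simp only [partsFrom]
      rw [hdrop, List.drop_eq_nil_of_le (by omega)]
      simp only [List.map_cons, List.map_nil]
      congr 1
      rw [show (Char.toString stored.toList[j]) = String.ofList [stored.toList[j]] from
        String.toByteArray_inj.mp rfl]
      simp only [PySem.Str.slice, PySem.Chars.slice]
      rw [PySem.List.slice_from_natCast]
      rw [hdrop, List.drop_eq_nil_of_le (by omega)]

-- ===== VERDICT (by name: the statement is the Claim_ definition above) =====
theorem try_segment_mapping_py_spec : Claim_equal_try_segment_mapping_py := by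
  intro stored plain _
  unfold Spec_try_segment_mapping_py try_segment_mapping_py try_segment_mapping_py_alt
  by_cases hg : (PySem.Str.len plain = 0 ∨ PySem.Str.len stored = 0 ∨
      PySem.Str.len plain > PySem.Str.len stored)
  · rw [if_pos hg, if_pos hg]
  · rw [if_neg hg, if_neg hg]
    rw [PySem.Str.len_eq, PySem.Str.len_eq] at hg
    have hp : 1 ≤ plain.toList.length := by
      rcases Nat.eq_zero_or_pos plain.toList.length with h0 | h1
      · exact absurd (by simp [h0]) hg
      · omega
    have hPlen : (plain.toList.map Char.toString).length = plain.toList.length := by simp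
    have hPne : plain.toList.map Char.toString ≠ [] := by
      intro h0
      rw [← hPlen, h0] at hp; simp at hp
    have hmain := dfsB_eq stored (PySem.Str.len stored)
      (plain.toList.map Char.toString) 0 PySem.Dict.empty PySem.Dict.empty hPne
    rw [show (0 : Int) + 1 = 1 from rfl] at hmain
    have hbridge := dfsB2_eq_dfsB stored (PySem.Str.len stored) (PySem.Str.len_eq stored)
      (plain.toList.map Char.toString) 0 PySem.Dict.empty PySem.Dict.empty invMR_empty le_rfl
      (by rw [PySem.Str.len_eq]; exact_mod_cast Nat.zero_le _)
    rw [hbridge]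
    by_cases hLN : PySem.Str.len stored = PySem.Str.len plain
    · have hLNn : stored.toList.length = plain.toList.length := by
        rw [PySem.Str.len_eq, PySem.Str.len_eq] at hLN; exact_mod_cast hLN
      rw [if_pos hLN, hmain]
      have hlen : (plain.toList.map Char.toString).length - 1 =
          (PySem.List.pyRange 1 (PySem.Str.len stored) 1).length := by
        rw [PySem.List.length_pyRange_one, hPlen, PySem.Str.len_eq, hLNn]; omega
      rw [hlen, combosA_all, List.findSome?_cons]
      have hcs := checkA_eq_checkSeq stored
        (PySem.List.pyRange 1 (stored.toList.length : Int) 1)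
        (plain.toList.map Char.toString) PySem.Dict.empty PySem.Dict.empty 0
        (by rw [hPlen, PySem.List.length_pyRange_one, hLNn]; omega)
      have hparts := partsFrom_range stored 0 (by omega)
      rw [Nat.cast_zero] at hparts
      rw [show ((0 : Int) + 1) = 1 from rfl] at hparts
      rw [List.drop_zero] at hparts
      rw [hparts] at hcs
      rw [show (PySem.Str.len stored) = (stored.toList.length : Int) from PySem.Str.len_eq stored]
      rw [← hcs]
      cases checkA (List.zip (plain.toList.map Char.toString)
        (stored.toList.map Char.toString)) PySem.Dict.empty PySem.Dict.empty <;> rfl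
    · rw [if_neg hLN, hmain, searchA_eq_findSome?]
      have hN1 : (PySem.Str.len plain - 1).toNat = (plain.toList.map Char.toString).length - 1 := by
        rw [hPlen, PySem.Str.len_eq]; omega
      rw [hN1]
      refine congrArg _ (findSome?_congr _ _ _ (fun cuts hmem => ?_))
      have hclen := length_combosA _ _ _ hmem
      rw [buildPartsA_eq]
      exact checkA_eq_checkSeq stored cuts (plain.toList.map Char.toString)
        PySem.Dict.empty PySem.Dict.empty 0 (by rw [hPlen] at hN1 ⊢; omega)
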